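-- pv_equiv track=rewrite | github.com/electrojustin/tensor_product_experiments | cuda_tp.py | sort_multiplicities
-- ===== SOURCE A (Python) =====
-- def sort_multiplicities(muls):
--   grouped_muls = []
--   for mul in muls:
--     if len(grouped_muls) == 0 or grouped_muls[-1][0][4] != mul[4] or grouped_muls[-1][0][5] != mul[5]:
--       grouped_muls.append([])
--     grouped_muls[-1].append(mul)
--   ret = []
--   for group in grouped_muls:
--     group.sort(key=lambda x: (x[0] + 1) * 16 + x[1])
--     ret += group
--   return ret
-- ===== SOURCE B (Python) =====
-- def sort_multiplicities(muls):
--   # One pass: tag each mul with a run id (incremented at each (m[4], m[5]) boundary),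
--   # then a single stable sort by (run id, original key) and strip the tags.
--   pairs = []
--   gid = 0
--   prev = None
--   for m in muls:
--     if prev is not None and (m[4] != prev[4] or m[5] != prev[5]):
--       gid += 1
--     pairs.append((gid, m))
--     prev = m
--   pairs.sort(key=lambda p: (p[0], (p[1][0] + 1) * 16 + p[1][1]))
--   return [m for _, m in pairs]
-- ===== Notes on version B (the rewrite author's own statement) =====
-- stated objective: alternative
-- what changed: Replaces building a list of run-groups and sorting each group separately with a single pass that tags every element with a run id followed by one global stable sort on the composite key (run id, (m[0]+1)*16+m[1]).
import Mathlib
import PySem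

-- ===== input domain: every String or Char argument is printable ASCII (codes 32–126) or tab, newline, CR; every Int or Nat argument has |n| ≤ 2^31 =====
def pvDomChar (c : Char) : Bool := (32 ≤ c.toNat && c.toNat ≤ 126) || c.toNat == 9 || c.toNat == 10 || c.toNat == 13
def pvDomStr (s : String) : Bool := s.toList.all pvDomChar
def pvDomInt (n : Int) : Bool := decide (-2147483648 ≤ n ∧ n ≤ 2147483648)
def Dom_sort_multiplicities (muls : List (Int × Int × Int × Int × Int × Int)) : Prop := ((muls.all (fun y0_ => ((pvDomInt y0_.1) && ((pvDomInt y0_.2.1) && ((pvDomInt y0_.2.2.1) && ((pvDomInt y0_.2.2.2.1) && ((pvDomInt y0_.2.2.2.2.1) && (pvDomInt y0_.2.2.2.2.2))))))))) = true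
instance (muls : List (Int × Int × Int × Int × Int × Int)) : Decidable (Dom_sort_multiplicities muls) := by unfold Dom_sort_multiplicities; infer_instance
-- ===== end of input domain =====

-- B replaces per-run grouping + per-group sorts by run-id tagging + ONE global stable sort (objective: alternative decomposition).

-- ===== PORT A =====
-- one iteration of A's grouping loop: maybe open a new group, then append mul to the last group
def pvStepA (acc : List (List (Int × Int × Int × Int × Int × Int)))
    (mul : Int × Int × Int × Int × Int × Int) : List (List (Int × Int × Int × Int × Int × Int)) :=
  let acc :=
    if acc.length = 0 ||
        (match acc.getLast? with
         | some g =>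
           match g.head? with
           | some h => decide (h.2.2.2.2.1 ≠ mul.2.2.2.2.1) || decide (h.2.2.2.2.2 ≠ mul.2.2.2.2.2)
           | none => true
         | none => true) then acc ++ [[]] else acc
  acc.dropLast ++ [(acc.getLastD []) ++ [mul]]

def sort_multiplicities (muls : List (Int × Int × Int × Int × Int × Int)) : List (Int × Int × Int × Int × Int × Int) :=
  let grouped_muls := muls.foldl pvStepA []
  grouped_muls.foldl (fun ret group => ret ++ PySem.List.sorted group (fun x => (x.1 + 1) * 16 + x.2.1) false) []

-- ===== PORT B =====
-- one iteration of B's tagging loop over state (pairs, gid, prev)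
def pvStepB (st : List (Int × (Int × Int × Int × Int × Int × Int)) × Int × Option (Int × Int × Int × Int × Int × Int))
    (m : Int × Int × Int × Int × Int × Int) :
    List (Int × (Int × Int × Int × Int × Int × Int)) × Int × Option (Int × Int × Int × Int × Int × Int) :=
  let gid := match st.2.2 with
    | some p => if decide (m.2.2.2.2.1 ≠ p.2.2.2.2.1) || decide (m.2.2.2.2.2 ≠ p.2.2.2.2.2) then st.2.1 + 1 else st.2.1
    | none => st.2.1
  (st.1 ++ [(gid, m)], gid, some m)

def sort_multiplicities_alt (muls : List (Int × Int × Int × Int × Int × Int)) : List (Int × Int × Int × Int × Int × Int) :=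
  let st := muls.foldl pvStepB ([], 0, none)
  (PySem.List.sorted2 st.1 (fun p => p.1) (fun p => (p.2.1 + 1) * 16 + p.2.2.1) false).map Prod.snd

-- ===== PRECONDITION & SPEC =====
def Spec_sort_multiplicities (muls : List (Int × Int × Int × Int × Int × Int)) (out : List (Int × Int × Int × Int × Int × Int)) : Prop := out = sort_multiplicities_alt muls
instance (muls : List (Int × Int × Int × Int × Int × Int)) (out : List (Int × Int × Int × Int × Int × Int)) : Decidable (Spec_sort_multiplicities muls out) := by unfold Spec_sort_multiplicities; infer_instance

-- ===== CLAIM (what is proved, stated in full; the proofs are below) =====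
def Claim_equal_sort_multiplicities : Prop := ∀ (muls : List (Int × Int × Int × Int × Int × Int)), Dom_sort_multiplicities muls → Spec_sort_multiplicities muls (sort_multiplicities muls)

-- ===== LEMMAS AND PROOFS =====

-- membership in an insertion-sort fold
theorem pv_mem_foldl_ins {α : Type} (before : α → α → Bool) :
    ∀ (ys : List α) (acc : List α) (x : α), x ∈ ys.foldl (fun a y => PySem.List.insertBy before y a) acc →
      x ∈ acc ∨ x ∈ ys := by
  intro ys
  induction ys with
  | nil => intro acc x h; exact Or.inl h
  | cons y ys ih =>
    intro acc x h
    rcases ih _ x h with h' | h'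
    · rcases (PySem.List.mem_insertBy _ _ _ _).1 h' with h'' | h''
      · exact Or.inr (by simp [h''])
      · exact Or.inl h''
    · exact Or.inr (List.mem_cons_of_mem _ h')

theorem pv_insertBy_append_left {α : Type} (before : α → α → Bool) (x : α) :
    ∀ (L T : List α), (∀ a ∈ L, before x a = false) →
      PySem.List.insertBy before x (L ++ T) = L ++ PySem.List.insertBy before x T := by
  intro L
  induction L with
  | nil => intro T _; rfl
  | cons a L ih =>
    intro T h
    have ha : before x a = false := h a (by simp)
    simp [PySem.List.insertBy, ha, ih T (fun b hb => h b (by simp [hb]))]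

theorem pv_foldl_ins_append {α : Type} (before : α → α → Bool) :
    ∀ (ys S T : List α), (∀ y ∈ ys, ∀ a ∈ S, before y a = false) →
      ys.foldl (fun a y => PySem.List.insertBy before y a) (S ++ T)
        = S ++ ys.foldl (fun a y => PySem.List.insertBy before y a) T := by
  intro ys
  induction ys with
  | nil => intro S T _; rfl
  | cons y ys ih =>
    intro S T h
    simp only [List.foldl_cons]
    rw [pv_insertBy_append_left before y S T (h y (by simp)),
      ih S _ (fun z hz a ha => h z (by simp [hz]) a ha)]

-- separation: the fold splits over an append when every right element sorts strictly after every left one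
theorem pv_foldl_ins_split {α : Type} (before : α → α → Bool) (X Y : List α)
    (h : ∀ x ∈ X, ∀ y ∈ Y, before y x = false) :
    (X ++ Y).foldl (fun a y => PySem.List.insertBy before y a) []
      = X.foldl (fun a y => PySem.List.insertBy before y a) []
        ++ Y.foldl (fun a y => PySem.List.insertBy before y a) [] := by
  rw [List.foldl_append]
  have := pv_foldl_ins_append before Y (X.foldl (fun a y => PySem.List.insertBy before y a) []) []
    (fun y hy a ha => by
      rcases pv_mem_foldl_ins before X [] a ha with h' | h'
      · cases h'
      · exact h a h' y hy)
  simpa using this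

theorem pv_insertBy_map {α β : Type} (before : α → α → Bool) (before' : β → β → Bool) (f : β → α)
    (hf : ∀ a b, before (f a) (f b) = before' a b) (x : β) :
    ∀ (l : List β), PySem.List.insertBy before (f x) (l.map f)
      = (PySem.List.insertBy before' x l).map f := by
  intro l
  induction l with
  | nil => rfl
  | cons a l ih => simp [PySem.List.insertBy, hf x a]; split <;> simp [ih]

theorem pv_foldl_ins_map {α β : Type} (before : α → α → Bool) (before' : β → β → Bool) (f : β → α)
    (hf : ∀ a b, before (f a) (f b) = before' a b) :
    ∀ (l acc : List β), (l.map f).foldl (fun a y => PySem.List.insertBy before y a) (acc.map f)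
      = (l.foldl (fun a y => PySem.List.insertBy before' y a) acc).map f := by
  intro l
  induction l with
  | nil => intro acc; rfl
  | cons b l ih => intro acc; simp only [List.map_cons, List.foldl_cons]
                   rw [pv_insertBy_map before before' f hf b acc, ih]

-- the tagged flattening of a list of groups, first group tagged n
def pvFlatEnum (n : Int) : List (List (Int × Int × Int × Int × Int × Int)) →
    List (Int × (Int × Int × Int × Int × Int × Int))
  | [] => []
  | g :: gs => g.map (fun x => (n, x)) ++ pvFlatEnum (n + 1) gs

def pvBB : (Int × (Int × Int × Int × Int × Int × Int)) → (Int × (Int × Int × Int × Int × Int × Int)) → Bool :=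
  fun a b => decide (a.1 < b.1) || (!decide (b.1 < a.1) && decide ((a.2.1 + 1) * 16 + a.2.2.1 < (b.2.1 + 1) * 16 + b.2.2.1))

theorem pv_flatEnum_ge (n : Int) : ∀ gs, ∀ p ∈ pvFlatEnum n gs, n ≤ p.1 := by
  intro gs
  induction gs generalizing n with
  | nil => intro p hp; cases hp
  | cons g gs ih =>
    intro p hp
    rcases List.mem_append.1 hp with h | h
    · rcases List.mem_map.1 h with ⟨x, _, rfl⟩; exact le_refl n
    · have := ih (n + 1) p h; omega

theorem pv_flatEnum_snoc (n : Int) :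
    ∀ (gs : List (List (Int × Int × Int × Int × Int × Int))) (g : List (Int × Int × Int × Int × Int × Int)),
      pvFlatEnum n (gs ++ [g]) = pvFlatEnum n gs ++ g.map (fun x => (n + (gs.length : Int), x)) := by
  intro gs
  induction gs generalizing n with
  | nil => intro g; simp [pvFlatEnum]
  | cons h gs ih =>
    intro g
    have harith : n + 1 + (gs.length : Int) = n + ((gs.length : Int) + 1) := by ring
    simp only [List.cons_append, pvFlatEnum, ih (n + 1) g, List.append_assoc, List.length_cons]
    push_cast
    rw [harith]

-- sorting the tagged flattening = concatenating the per-group sorts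
theorem pv_sorted_flatEnum (gs : List (List (Int × Int × Int × Int × Int × Int))) :
    ∀ n : Int, ((pvFlatEnum n gs).foldl (fun a y => PySem.List.insertBy pvBB y a) []).map Prod.snd
      = (gs.map (fun g => PySem.List.sorted g (fun x => (x.1 + 1) * 16 + x.2.1) false)).flatten := by
  induction gs with
  | nil => intro n; rfl
  | cons g gs ih =>
    intro n
    have hsep : ∀ x ∈ g.map (fun x => (n, x)), ∀ y ∈ pvFlatEnum (n + 1) gs, pvBB y x = false := by
      intro x hx y hy
      rcases List.mem_map.1 hx with ⟨a, _, rfl⟩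
      have hy1 : n + 1 ≤ y.1 := pv_flatEnum_ge (n + 1) gs y hy
      simp only [pvBB]
      have h1 : ¬ (y.1 < n) := by omega
      have h2 : n < y.1 := by omega
      simp [h1, h2]
    rw [pvFlatEnum, pv_foldl_ins_split pvBB _ _ hsep, List.map_append]
    have hmap : (g.map (fun x => ((n, x) : Int × (Int × Int × Int × Int × Int × Int)))).foldl
        (fun a y => PySem.List.insertBy pvBB y a) []
        = (g.foldl (fun a y => PySem.List.insertBy
            (fun a b => decide ((a.1 + 1) * 16 + a.2.1 < (b.1 + 1) * 16 + b.2.1)) y a) []).map (fun x => (n, x)) := by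
      have := pv_foldl_ins_map pvBB
        (fun a b => decide ((a.1 + 1) * 16 + a.2.1 < (b.1 + 1) * 16 + b.2.1))
        (fun x => ((n, x) : Int × (Int × Int × Int × Int × Int × Int)))
        (fun a b => by simp [pvBB]) g []
      simpa using this
    rw [hmap, ih (n + 1)]
    simp [PySem.List.sorted, List.map_map, Function.comp_def,
      List.flatten_cons]

-- A's boundary test on the head of the last run agrees with B's test on the previous element
theorem pv_inv : ∀ (rest : List (Int × Int × Int × Int × Int × Int))
    (G : List (List (Int × Int × Int × Int × Int × Int))) (g : List (Int × Int × Int × Int × Int × Int))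
    (p : Int × Int × Int × Int × Int × Int),
    g ≠ [] → (∀ x ∈ g, x.2.2.2.2.1 = p.2.2.2.2.1 ∧ x.2.2.2.2.2 = p.2.2.2.2.2) →
    (rest.foldl pvStepB (pvFlatEnum 0 (G ++ [g]), (G.length : Int), some p)).1
      = pvFlatEnum 0 (rest.foldl pvStepA (G ++ [g])) := by
  intro rest
  induction rest with
  | nil => intro G g p _ _; rfl
  | cons m rest ih =>
    intro G g p hg hall
    obtain ⟨h, g', rfl⟩ : ∃ h g', g = h :: g' := by
      cases g with
      | nil => exact absurd rfl hg
      | cons h g' => exact ⟨h, g', rfl⟩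
    have hh := hall h (by simp)
    by_cases hsame : m.2.2.2.2.1 = p.2.2.2.2.1 ∧ m.2.2.2.2.2 = p.2.2.2.2.2
    · -- same run: A appends to the last group, B keeps gid
      have hA : pvStepA (G ++ [h :: g']) m = G ++ [(h :: g') ++ [m]] := by
        simp [pvStepA, hh.1, hh.2, hsame.1, hsame.2]
      have hB : pvStepB (pvFlatEnum 0 (G ++ [h :: g']), (G.length : Int), some p) m
          = (pvFlatEnum 0 (G ++ [(h :: g') ++ [m]]), (G.length : Int), some m) := by
        simp [pvStepB, hsame.1, hsame.2, pv_flatEnum_snoc]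
      simp only [List.foldl_cons, hA, hB]
      exact ih G ((h :: g') ++ [m]) m (by simp)
        (fun x hx => by
          rcases List.mem_append.1 hx with hx | hx
          · have := hall x hx; exact ⟨this.1.trans hsame.1.symm, this.2.trans hsame.2.symm⟩
          · simp at hx; subst hx; exact ⟨rfl, rfl⟩)
    · -- boundary: A opens a new group, B increments gid
      have hne : ¬(h.2.2.2.2.1 = m.2.2.2.2.1 ∧ h.2.2.2.2.2 = m.2.2.2.2.2) := by
        intro hc
        exact hsame ⟨hc.1 ▸ hh.1, hc.2 ▸ hh.2⟩
      have hA : pvStepA (G ++ [h :: g']) m = (G ++ [h :: g']) ++ [[m]] := by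
        by_cases h1 : h.2.2.2.2.1 = m.2.2.2.2.1
        · have h2 : h.2.2.2.2.2 ≠ m.2.2.2.2.2 := fun h2 => hne ⟨h1, h2⟩
          simp [pvStepA, h1, h2]
        · simp [pvStepA, h1]
      have hBcond : ¬(m.2.2.2.2.1 = p.2.2.2.2.1 ∧ m.2.2.2.2.2 = p.2.2.2.2.2) := hsame
      have hB : pvStepB (pvFlatEnum 0 (G ++ [h :: g']), (G.length : Int), some p) m
          = (pvFlatEnum 0 ((G ++ [h :: g']) ++ [[m]]), ((G ++ [h :: g']).length : Int), some m) := by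
        rw [pv_flatEnum_snoc 0 (G ++ [h :: g']) [m]]
        by_cases h1 : m.2.2.2.2.1 = p.2.2.2.2.1
        · have h2 : m.2.2.2.2.2 ≠ p.2.2.2.2.2 := fun h2 => hBcond ⟨h1, h2⟩
          simp [pvStepB, h1, h2]
        · simp [pvStepB, h1]
      simp only [List.foldl_cons, hA, hB]
      exact ih (G ++ [h :: g']) [m] m (by simp) (fun x hx => by simp at hx; subst hx; exact ⟨rfl, rfl⟩)

-- ===== VERDICT (by name: the statement is the Claim_ definition above) =====
theorem sort_multiplicities_spec : Claim_equal_sort_multiplicities := by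
  intro muls _
  unfold Spec_sort_multiplicities sort_multiplicities sort_multiplicities_alt
  cases muls with
  | nil => rfl
  | cons m rest =>
    have h0A : pvStepA [] m = [] ++ [[m]] := by simp [pvStepA, List.getLastD]
    have h0B : pvStepB ([], 0, none) m = (pvFlatEnum 0 ([] ++ [[m]]), (([] : List (List (Int × Int × Int × Int × Int × Int))).length : Int), some m) := by
      simp [pvStepB, pvFlatEnum]
    simp only [List.foldl_cons, h0A, h0B]
    rw [pv_inv rest [] [m] m (by simp) (fun x hx => by simp at hx; subst hx; exact ⟨rfl, rfl⟩)]
    have hs2 : ∀ l : List (Int × (Int × Int × Int × Int × Int × Int)),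
        PySem.List.sorted2 l (fun p => p.1) (fun p => (p.2.1 + 1) * 16 + p.2.2.1) false
          = l.foldl (fun a y => PySem.List.insertBy pvBB y a) [] := fun l => rfl
    rw [hs2, pv_sorted_flatEnum _ 0]
    rw [PySem.List.foldl_append_eq_flatMap]
    simp [List.flatMap_def]
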